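-- pv_equiv track=rewrite | github.com/MettaMazza/Ernos-3.0 | src/gaming/planner.py | _has_tool
-- ===== SOURCE A (Python) =====
-- from typing import List, Dict, Optional, Tuple
--
-- def _has_tool(tool: str, inventory: Dict[str, int]) -> bool:
--     """Check if we have a specific tool or better."""
--     tool_hierarchy = {
--         "wooden_pickaxe": 0,
--         "stone_pickaxe": 1,
--         "iron_pickaxe": 2,
--         "diamond_pickaxe": 3,
--     }
--
--     if tool not in tool_hierarchy:
--         return inventory.get(tool, 0) > 0
--
--     min_tier = tool_hierarchy[tool]
--     for t, tier in tool_hierarchy.items():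
--         if tier >= min_tier and inventory.get(t, 0) > 0:
--             return True
--     return False
-- ===== SOURCE B (Python) =====
-- def _has_tool(tool: str, inventory: dict) -> bool:
--     """Check if we have a specific tool or better."""
--     if tool == "diamond_pickaxe":
--         return inventory.get("diamond_pickaxe", 0) > 0
--     upgrade = {
--         "wooden_pickaxe": "stone_pickaxe",
--         "stone_pickaxe": "iron_pickaxe",
--         "iron_pickaxe": "diamond_pickaxe",
--     }
--     if tool not in upgrade:
--         return inventory.get(tool, 0) > 0
--     return inventory.get(tool, 0) > 0 or _has_tool(upgrade[tool], inventory)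
-- ===== Notes on version B (the rewrite author's own statement) =====
-- stated objective: alternative
-- what changed: Replaces A's tier-number dict and full scan with a tier>=min comparison by structural recursion on a successor ('upgrade') map: have the tool itself, or recursively have its next-better tool; no numeric tiers and no scan over the whole hierarchy.
import Mathlib
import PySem

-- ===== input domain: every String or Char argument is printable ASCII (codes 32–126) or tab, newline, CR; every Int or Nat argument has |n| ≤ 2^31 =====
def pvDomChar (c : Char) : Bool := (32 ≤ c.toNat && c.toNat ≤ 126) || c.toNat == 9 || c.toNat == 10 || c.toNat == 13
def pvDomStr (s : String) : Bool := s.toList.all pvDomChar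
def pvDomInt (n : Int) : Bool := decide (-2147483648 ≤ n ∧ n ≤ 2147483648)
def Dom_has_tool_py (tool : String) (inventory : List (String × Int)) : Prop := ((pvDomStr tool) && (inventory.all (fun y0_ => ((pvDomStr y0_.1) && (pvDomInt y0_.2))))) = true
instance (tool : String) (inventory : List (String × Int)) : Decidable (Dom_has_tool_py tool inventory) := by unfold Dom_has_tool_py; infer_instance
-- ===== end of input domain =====

-- B replaces A's tier-number dict + full scan with a tier comparison by structural
-- recursion on a successor ('upgrade') map: have the tool itself, or recursively have
-- its next-better tool (alternative decomposition; same values everywhere).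

-- ===== PORT A =====
-- the literal tool_hierarchy dict of A
def pvHierarchy : PySem.Dict String Int :=
  PySem.Dict.ofList [("wooden_pickaxe", 0), ("stone_pickaxe", 1), ("iron_pickaxe", 2), ("diamond_pickaxe", 3)]

-- A's 'for t, tier in tool_hierarchy.items(): if tier >= min_tier and inventory.get(t,0) > 0: return True'
def pvLoopA (inventory : List (String × Int)) (minTier : Int) : List (String × Int) → Bool
  | [] => false
  | (t, tier) :: rest =>
    if tier ≥ minTier && (PySem.Dict.mk inventory).getD t 0 > 0 then true
    else pvLoopA inventory minTier rest

def has_tool_py (tool : String) (inventory : List (String × Int)) : Bool :=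
  match pvHierarchy.get? tool with
  | none => (PySem.Dict.mk inventory).getD tool 0 > 0
  | some minTier => pvLoopA inventory minTier pvHierarchy.items

-- ===== PORT B =====
-- B's 'upgrade' successor map
def pvUpgrade : PySem.Dict String String :=
  PySem.Dict.ofList [("wooden_pickaxe", "stone_pickaxe"), ("stone_pickaxe", "iron_pickaxe"), ("iron_pickaxe", "diamond_pickaxe")]

-- measure cited by decreasing_by to justify termination of B's recursion up the upgrade chain
def pvRankB (t : String) : Nat :=
  if t = "wooden_pickaxe" then 3 else if t = "stone_pickaxe" then 2 else if t = "iron_pickaxe" then 1 else 0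

theorem pvUpgrade_rank_lt (tool nxt : String) (h : pvUpgrade.get? tool = some nxt) :
    pvRankB nxt < pvRankB tool := by
  have e : pvUpgrade = PySem.Dict.mk
      [("wooden_pickaxe", "stone_pickaxe"), ("stone_pickaxe", "iron_pickaxe"), ("iron_pickaxe", "diamond_pickaxe")] := by
    decide
  rw [e] at h
  simp only [PySem.Dict.get?_mk_cons] at h
  split_ifs at h with h1 h2 h3 <;> simp_all [PySem.Dict.get?, pvRankB] <;> subst_vars <;> simp

-- B: 'have the tool itself, or recursively have its upgrade' (unknown tools: plain lookup)
def has_tool_py_alt (tool : String) (inventory : List (String × Int)) : Bool :=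
  if tool = "diamond_pickaxe" then (PySem.Dict.mk inventory).getD "diamond_pickaxe" 0 > 0
  else
    match h : pvUpgrade.get? tool with
    | none => (PySem.Dict.mk inventory).getD tool 0 > 0
    | some nxt => ((PySem.Dict.mk inventory).getD tool 0 > 0) || has_tool_py_alt nxt inventory
termination_by pvRankB tool
decreasing_by exact pvUpgrade_rank_lt _ _ h

-- ===== PRECONDITION & SPEC =====
def Spec_has_tool_py (tool : String) (inventory : List (String × Int)) (out : Bool) : Prop := out = has_tool_py_alt tool inventory
instance (tool : String) (inventory : List (String × Int)) (out : Bool) : Decidable (Spec_has_tool_py tool inventory out) := by unfold Spec_has_tool_py; infer_instance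

-- ===== CLAIM (what is proved, stated in full; the proofs are below) =====
def Claim_equal_has_tool_py : Prop := ∀ (tool : String) (inventory : List (String × Int)), Dom_has_tool_py tool inventory → Spec_has_tool_py tool inventory (has_tool_py tool inventory)

-- ===== LEMMAS AND PROOFS =====
theorem pvAltD (inv : List (String × Int)) :
    has_tool_py_alt "diamond_pickaxe" inv = decide (0 < (PySem.Dict.mk inv).getD "diamond_pickaxe" 0) := by
  rw [has_tool_py_alt]; simp

theorem pvAltI (inv : List (String × Int)) :
    has_tool_py_alt "iron_pickaxe" inv =
      (decide (0 < (PySem.Dict.mk inv).getD "iron_pickaxe" 0) || has_tool_py_alt "diamond_pickaxe" inv) := by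
  rw [has_tool_py_alt]; rfl

theorem pvAltS (inv : List (String × Int)) :
    has_tool_py_alt "stone_pickaxe" inv =
      (decide (0 < (PySem.Dict.mk inv).getD "stone_pickaxe" 0) || has_tool_py_alt "iron_pickaxe" inv) := by
  rw [has_tool_py_alt]; rfl

theorem pvAltW (inv : List (String × Int)) :
    has_tool_py_alt "wooden_pickaxe" inv =
      (decide (0 < (PySem.Dict.mk inv).getD "wooden_pickaxe" 0) || has_tool_py_alt "stone_pickaxe" inv) := by
  rw [has_tool_py_alt]; rfl

-- ===== VERDICT (by name: the statement is the Claim_ definition above) =====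
theorem has_tool_py_spec : Claim_equal_has_tool_py := by
  intro tool inventory _
  unfold Spec_has_tool_py has_tool_py
  have eItems : pvHierarchy.items =
      [("wooden_pickaxe", 0), ("stone_pickaxe", 1), ("iron_pickaxe", 2), ("diamond_pickaxe", 3)] := rfl
  by_cases h0 : tool = "wooden_pickaxe"
  · subst h0
    rw [show pvHierarchy.get? "wooden_pickaxe" = some 0 from rfl, eItems, pvAltW, pvAltS, pvAltI, pvAltD]
    simp [pvLoopA]
  by_cases h1 : tool = "stone_pickaxe"
  · subst h1
    rw [show pvHierarchy.get? "stone_pickaxe" = some 1 from rfl, eItems, pvAltS, pvAltI, pvAltD]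
    simp [pvLoopA]
  by_cases h2 : tool = "iron_pickaxe"
  · subst h2
    rw [show pvHierarchy.get? "iron_pickaxe" = some 2 from rfl, eItems, pvAltI, pvAltD]
    simp [pvLoopA]
  by_cases h3 : tool = "diamond_pickaxe"
  · subst h3
    rw [show pvHierarchy.get? "diamond_pickaxe" = some 3 from rfl, eItems, pvAltD]
    simp [pvLoopA]
  · have n0 : ("wooden_pickaxe" : String) ≠ tool := fun h => h0 h.symm
    have n1 : ("stone_pickaxe" : String) ≠ tool := fun h => h1 h.symm
    have n2 : ("iron_pickaxe" : String) ≠ tool := fun h => h2 h.symm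
    have n3 : ("diamond_pickaxe" : String) ≠ tool := fun h => h3 h.symm
    have hA : pvHierarchy.get? tool = none := by
      rw [show pvHierarchy = PySem.Dict.mk [("wooden_pickaxe", 0), ("stone_pickaxe", 1), ("iron_pickaxe", 2), ("diamond_pickaxe", 3)] from by decide]
      simp [PySem.Dict.get?, n0, n1, n2, n3]
    have hB : pvUpgrade.get? tool = none := by
      rw [show pvUpgrade = PySem.Dict.mk [("wooden_pickaxe", "stone_pickaxe"), ("stone_pickaxe", "iron_pickaxe"), ("iron_pickaxe", "diamond_pickaxe")] from by decide]
      simp [PySem.Dict.get?, n0, n1, n2]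
    rw [hA, has_tool_py_alt]
    simp only [if_neg h3]
    split <;> simp_all
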